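-- pv_equiv track=rewrite | github.com/Pocsi/AgentForge | core/compression.py | _identify_topics
-- ===== SOURCE A (Python) =====
-- from typing import Dict, Any, List, Optional
--
-- def _identify_topics(conversations: List[Dict[str, str]]) -> Dict[str, List[Dict[str, str]]]:
--     """
--     Group conversations by topic using simple keyword matching
--
--     Args:
--         conversations: List of conversation dictionaries
--
--     Returns:
--         Dictionary mapping topic names to lists of conversations
--     """
--     # Simple keyword-based topic identification
--     topics = {
--         "finance": [],
--         "time_series": [],
--         "forecasting": [],
--         "signal_processing": [],
--         "general": []
--     }
--
--     # Keywords for each topic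
--     topic_keywords = {
--         "finance": ["money", "payment", "invest", "finance", "bank", "transaction", "crypto", "wallet"],
--         "time_series": ["time series", "data analysis", "trend", "pattern", "historical data"],
--         "forecasting": ["forecast", "predict", "future", "projection", "model"],
--         "signal_processing": ["signal", "iot", "sensor", "frequency", "filter", "edge"]
--     }
--
--     for conv in conversations:
--         # Combine user and agent messages for topic detection
--         combined_text = (conv.get("user", "") + " " + conv.get("agent", "")).lower()
--
--         assigned = False
--         for topic, keywords in topic_keywords.items():
--             if any(keyword in combined_text for keyword in keywords):
--                 topics[topic].append(conv)
--                 assigned = True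
--                 break
--
--         # If no specific topic matched, add to general
--         if not assigned:
--             topics["general"].append(conv)
--
--     # Remove empty topics
--     return {k: v for k, v in topics.items() if v}
-- ===== SOURCE B (Python) =====
-- from typing import Dict, List
--
--
-- def _identify_topics(conversations: List[Dict[str, str]]) -> Dict[str, List[Dict[str, str]]]:
--     """Group conversations by topic: topic-major partition of a shrinking pool."""
--     topic_keywords = {
--         "finance": ["money", "payment", "invest", "finance", "bank", "transaction", "crypto", "wallet"],
--         "time_series": ["time series", "data analysis", "trend", "pattern", "historical data"],
--         "forecasting": ["forecast", "predict", "future", "projection", "model"],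
--         "signal_processing": ["signal", "iot", "sensor", "frequency", "filter", "edge"],
--     }
--
--     def _matches(conv, keywords):
--         text = (conv.get("user", "") + " " + conv.get("agent", "")).lower()
--         return any(k in text for k in keywords)
--
--     result = {}
--     remaining = list(conversations)
--     for topic, keywords in topic_keywords.items():
--         hit = [c for c in remaining if _matches(c, keywords)]
--         remaining = [c for c in remaining if not _matches(c, keywords)]
--         if hit:
--             result[topic] = hit
--     if remaining:
--         result["general"] = remaining
--     return result
-- ===== Notes on version B (the rewrite author's own statement) =====
-- stated objective: alternative
-- what changed: Topic-major instead of conversation-major: for each topic in order, split the shrinking remaining pool into matches and the rest, with leftovers becoming 'general', instead of scanning topics per conversation with an assigned flag and pre-seeded empty buckets filtered at the end.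
import Mathlib
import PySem

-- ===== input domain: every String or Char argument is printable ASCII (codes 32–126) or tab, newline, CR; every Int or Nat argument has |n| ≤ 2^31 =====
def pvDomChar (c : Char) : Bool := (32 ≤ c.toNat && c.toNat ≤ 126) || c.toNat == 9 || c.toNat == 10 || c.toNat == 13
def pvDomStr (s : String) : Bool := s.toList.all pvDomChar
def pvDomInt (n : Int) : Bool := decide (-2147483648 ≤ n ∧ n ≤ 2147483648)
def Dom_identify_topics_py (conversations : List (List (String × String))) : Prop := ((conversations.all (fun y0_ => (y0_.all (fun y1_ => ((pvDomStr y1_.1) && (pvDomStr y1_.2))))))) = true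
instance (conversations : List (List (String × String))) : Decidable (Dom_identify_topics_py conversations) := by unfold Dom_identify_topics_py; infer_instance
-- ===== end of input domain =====

-- B groups topic-major (splitting a shrinking remaining pool per topic) instead of A's
-- conversation-major scan with an assigned flag and pre-seeded buckets; same cost, alternative structure.

-- shared helpers (both Pythons build the same lowered "user"+" "+"agent" text and keyword test)
def pvLookup (conv : List (String × String)) (k : String) : String :=
  ((conv.find? (fun p => p.1 == k)).map (fun p => p.2)).getD ""

def pvText (conv : List (String × String)) : List Char :=
  PySem.Chars.lower ((pvLookup conv "user").toList ++ ' ' :: (pvLookup conv "agent").toList)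

def pvMatches (kws : List String) (conv : List (String × String)) : Bool :=
  kws.any (fun kw => PySem.Chars.isIn kw.toList (pvText conv))

def pvTopicKeywords : List (String × List String) :=
  [("finance", ["money", "payment", "invest", "finance", "bank", "transaction", "crypto", "wallet"]),
   ("time_series", ["time series", "data analysis", "trend", "pattern", "historical data"]),
   ("forecasting", ["forecast", "predict", "future", "projection", "model"]),
   ("signal_processing", ["signal", "iot", "sensor", "frequency", "filter", "edge"])]

-- ===== PORT A =====
-- A's inner 'for topic, keywords … break' loop: first topic whose keyword list matches
def pvAssign : List (String × List String) → List (String × String) → Option String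
  | [], _ => none
  | (t, kws) :: rest, conv => if pvMatches kws conv then some t else pvAssign rest conv

def identify_topics_py (conversations : List (List (String × String))) : List (String × List (List (String × String))) :=
  let init : PySem.Dict String (List (List (String × String))) :=
    PySem.Dict.mk [("finance", []), ("time_series", []), ("forecasting", []),
                   ("signal_processing", []), ("general", [])]
  let final := conversations.foldl (fun d conv =>
      match pvAssign pvTopicKeywords conv with
      | some t => d.modify t [] (fun l => l ++ [conv])
      | none => d.modify "general" [] (fun l => l ++ [conv])) init
  final.items.filter (fun p => !p.2.isEmpty)

-- ===== PORT B =====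
def identify_topics_py_alt (conversations : List (List (String × String))) : List (String × List (List (String × String))) :=
  let acc := pvTopicKeywords.foldl (fun acc tk =>
      let hit := acc.2.filter (fun c => pvMatches tk.2 c)
      let rem := acc.2.filter (fun c => !pvMatches tk.2 c)
      ((if hit.isEmpty then acc.1 else acc.1 ++ [(tk.1, hit)]), rem))
    (([] : List (String × List (List (String × String)))), conversations)
  if acc.2.isEmpty then acc.1 else acc.1 ++ [("general", acc.2)]

-- ===== PRECONDITION & SPEC =====
def Spec_identify_topics_py (conversations : List (List (String × String))) (out : List (String × List (List (String × String)))) : Prop := out = identify_topics_py_alt conversations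
instance (conversations : List (List (String × String))) (out : List (String × List (List (String × String)))) : Decidable (Spec_identify_topics_py conversations out) := by unfold Spec_identify_topics_py; infer_instance

-- ===== CLAIM (what is proved, stated in full; the proofs are below) =====
def Claim_equal_identify_topics_py : Prop := ∀ (conversations : List (List (String × String))), Dom_identify_topics_py conversations → Spec_identify_topics_py conversations (identify_topics_py conversations)

-- ===== LEMMAS AND PROOFS =====

-- the key A appends conv under
def pvKey (conv : List (String × String)) : String :=
  (pvAssign pvTopicKeywords conv).getD "general"

theorem pvAssign_mem (ts : List (String × List String)) (c : List (String × String)) (t : String)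
    (h : pvAssign ts c = some t) : t ∈ ts.map Prod.fst := by
  induction ts with
  | nil => simp [pvAssign] at h
  | cons hd tl ih =>
    obtain ⟨t', kws⟩ := hd
    by_cases hm : pvMatches kws c
    · simp [pvAssign, hm] at h; simp [h]
    · simp [pvAssign, hm] at h
      exact List.mem_cons_of_mem _ (ih h)

theorem stepA_eq (d : PySem.Dict String (List (List (String × String)))) (c : List (String × String)) :
    (match pvAssign pvTopicKeywords c with
      | some t => d.modify t [] (fun l => l ++ [c])
      | none => d.modify "general" [] (fun l => l ++ [c])) =
    d.modify (pvKey c) [] (fun l => l ++ [c]) := by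
  unfold pvKey
  cases pvAssign pvTopicKeywords c <;> rfl

theorem foldA_items (l : List (List (String × String)))
    (d : PySem.Dict String (List (List (String × String))))
    (hnd : d.keys.Nodup) (hk : ∀ c ∈ l, pvKey c ∈ d.keys) :
    (l.foldl (fun d conv =>
        match pvAssign pvTopicKeywords conv with
        | some t => d.modify t [] (fun l => l ++ [conv])
        | none => d.modify "general" [] (fun l => l ++ [conv])) d).items =
      d.items.map (fun p => (p.1, p.2 ++ l.filter (fun c => pvKey c == p.1))) := by
  induction l generalizing d with
  | nil => simp
  | cons c l ih =>
    simp only [List.foldl_cons]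
    rw [stepA_eq]
    have hc : d.contains (pvKey c) = true :=
      (PySem.Dict.contains_iff_mem_keys d _).mpr (hk c (by simp))
    have hkeys : (d.modify (pvKey c) [] (fun l => l ++ [c])).keys = d.keys := by
      rw [PySem.Dict.modify]
      exact PySem.Dict.keys_insert_of_contains d _ hc
    rw [ih _ (by rw [hkeys]; exact hnd) (fun c' h' => by rw [hkeys]; exact hk c' (List.mem_cons_of_mem _ h'))]
    have hitems : (d.modify (pvKey c) [] (fun l => l ++ [c])).items
        = d.items.map (fun p => if p.1 == pvKey c then (pvKey c, d.getD (pvKey c) [] ++ [c]) else p) := by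
      rw [PySem.Dict.modify]
      exact PySem.Dict.items_insert_of_contains d _ hc
    rw [hitems, List.map_map]
    apply List.map_congr_left
    intro p hp
    have hget : d.get? p.1 = some p.2 := PySem.Dict.get?_of_mem_items d (by simpa using hp) hnd
    by_cases hbeq : p.1 = pvKey c
    · have hgd : d.getD (pvKey c) [] = p.2 := by
        rw [PySem.Dict.getD, ← hbeq, hget]; rfl
      simp [Function.comp, hbeq, hgd]
    · simp [Function.comp, hbeq, Ne.symm hbeq]

-- B's fold: remaining is the pool unmatched so far, result the nonempty buckets so far
def pvBuckets : List (String × List String) → List (List (String × String)) →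
    List (String × List (List (String × String)))
  | [], _ => []
  | (t, kws) :: ts, r =>
    (if (r.filter (fun c => pvMatches kws c)).isEmpty then [] else [(t, r.filter (fun c => pvMatches kws c))])
      ++ pvBuckets ts (r.filter (fun c => !pvMatches kws c))

theorem foldB_eq (ts : List (String × List String))
    (res : List (String × List (List (String × String)))) (r : List (List (String × String))) :
    ts.foldl (fun acc tk =>
      ((if (acc.2.filter (fun c => pvMatches tk.2 c)).isEmpty then acc.1
        else acc.1 ++ [(tk.1, acc.2.filter (fun c => pvMatches tk.2 c))]),
       acc.2.filter (fun c => !pvMatches tk.2 c))) (res, r) =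
    (res ++ pvBuckets ts r, r.filter (fun c => pvAssign ts c == none)) := by
  induction ts generalizing res r with
  | nil => simp [pvBuckets, pvAssign]
  | cons hd tl ih =>
    obtain ⟨t, kws⟩ := hd
    simp only [List.foldl_cons, ih, pvBuckets]
    refine congrArg₂ Prod.mk ?_ ?_
    · split_ifs <;> simp_all
    · rw [List.filter_filter]
      apply List.filter_congr
      intro c _
      by_cases hm : pvMatches kws c <;> simp [pvAssign, hm]

theorem pvBuckets_eq (ts : List (String × List String)) (r : List (List (String × String)))
    (hnd : (ts.map Prod.fst).Nodup) :
    pvBuckets ts r =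
      (ts.map (fun tk => (tk.1, r.filter (fun c => pvAssign ts c == some tk.1)))).filter
        (fun p => !p.2.isEmpty) := by
  induction ts generalizing r with
  | nil => simp [pvBuckets]
  | cons hd tl ih =>
    obtain ⟨t, kws⟩ := hd
    simp only [List.map_cons, List.nodup_cons] at hnd
    obtain ⟨hnotin, hnd'⟩ := hnd
    have h1 : r.filter (fun c => pvAssign ((t, kws) :: tl) c == some t)
        = r.filter (fun c => pvMatches kws c) := by
      apply List.filter_congr; intro c _
      by_cases hm : pvMatches kws c
      · simp [pvAssign, hm]
      · cases hA : pvAssign tl c with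
        | none => simp [pvAssign, hm, hA]
        | some u =>
          have hu := pvAssign_mem tl c u hA
          have hm' : pvMatches kws c = false := by simpa using hm
          simp only [pvAssign, hm', Bool.false_eq_true, if_false, hA]
          exact decide_eq_false (fun he => hnotin (he ▸ hu))
    have h2 : ∀ tk ∈ tl, r.filter (fun c => pvAssign ((t, kws) :: tl) c == some tk.1)
        = (r.filter (fun c => !pvMatches kws c)).filter (fun c => pvAssign tl c == some tk.1) := by
      intro tk htk
      rw [List.filter_filter]
      apply List.filter_congr; intro c _
      by_cases hm : pvMatches kws c
      · have hne : ¬ (t = tk.1) := fun h => hnotin (h ▸ List.mem_map_of_mem htk)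
        simp [pvAssign, hm, hne]
      · simp [pvAssign, hm]
    rw [pvBuckets, ih _ hnd']
    have h3 : tl.map (fun tk => (tk.1, r.filter (fun c => pvAssign ((t, kws) :: tl) c == some tk.1)))
        = tl.map (fun tk => (tk.1, (r.filter (fun c => !pvMatches kws c)).filter (fun c => pvAssign tl c == some tk.1))) := by
      apply List.map_congr_left; intro tk htk; rw [h2 tk htk]
    rw [List.map_cons, h1, h3, List.filter_cons]
    by_cases he : (r.filter (fun c => pvMatches kws c)).isEmpty <;> simp [he]

-- ===== VERDICT (by name: the statement is the Claim_ definition above) =====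
theorem pvFilterSnoc {α : Type} (p : α → Bool) (a b c d e : α) :
    List.filter p [a, b, c, d, e] = List.filter p [a, b, c, d] ++ List.filter p [e] := by
  rw [show [a, b, c, d, e] = [a, b, c, d] ++ [e] from rfl, List.filter_append]

theorem key_some (t : String) (ht : t ≠ "general") (c : List (String × String)) :
    (pvKey c == t) = (pvAssign pvTopicKeywords c == some t) := by
  unfold pvKey
  cases h : pvAssign pvTopicKeywords c with
  | none => simp [Ne.symm ht]
  | some u => simp

theorem key_gen (c : List (String × String)) :
    (pvKey c == "general") = (pvAssign pvTopicKeywords c == none) := by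
  unfold pvKey
  cases h : pvAssign pvTopicKeywords c with
  | none => simp
  | some u =>
    have hu := pvAssign_mem _ _ _ h
    have hne : u ≠ "general" := by
      intro he; rw [he] at hu; revert hu; simp [pvTopicKeywords]
    simp [hne]

theorem identify_topics_py_spec : Claim_equal_identify_topics_py := by
  intro conversations _
  show identify_topics_py conversations = identify_topics_py_alt conversations
  have hk : ∀ c ∈ conversations, pvKey c ∈
      (PySem.Dict.mk ([("finance", []), ("time_series", []), ("forecasting", []),
        ("signal_processing", []), ("general", [])] :
          List (String × List (List (String × String))))).keys := by
    intro c _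
    unfold pvKey
    cases h : pvAssign pvTopicKeywords c with
    | none => decide
    | some u =>
      have hu := pvAssign_mem _ _ _ h
      simp only [pvTopicKeywords, List.map_cons, List.map_nil, List.mem_cons,
        List.not_mem_nil, or_false] at hu
      simp only [Option.getD_some]
      rcases hu with rfl | rfl | rfl | rfl <;> decide
  simp only [identify_topics_py, identify_topics_py_alt]
  rw [foldA_items conversations _ (by decide) hk, foldB_eq, pvBuckets_eq _ _ (by decide)]
  have e1 := List.filter_congr (l := conversations) (fun c _ => key_some "finance" (by decide) c)
  have e2 := List.filter_congr (l := conversations) (fun c _ => key_some "time_series" (by decide) c)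
  have e3 := List.filter_congr (l := conversations) (fun c _ => key_some "forecasting" (by decide) c)
  have e4 := List.filter_congr (l := conversations) (fun c _ => key_some "signal_processing" (by decide) c)
  have e5 := List.filter_congr (l := conversations) (fun c _ => key_gen c)
  simp only [pvTopicKeywords] at e1 e2 e3 e4 e5 ⊢
  simp only [List.map_cons, List.map_nil, List.nil_append, e1, e2, e3, e4, e5]
  rw [pvFilterSnoc]
  by_cases hG : (conversations.filter (fun c => pvAssign
      [("finance", ["money", "payment", "invest", "finance", "bank", "transaction", "crypto", "wallet"]),
       ("time_series", ["time series", "data analysis", "trend", "pattern", "historical data"]),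
       ("forecasting", ["forecast", "predict", "future", "projection", "model"]),
       ("signal_processing", ["signal", "iot", "sensor", "frequency", "filter", "edge"])] c == none)).isEmpty
  · simp only [List.filter_cons, List.filter_nil, hG, Bool.not_true, Bool.false_eq_true,
      if_false, if_true, List.append_nil]
  · simp only [List.filter_cons, List.filter_nil, Bool.not_eq_eq_eq_not, Bool.not_true] at *
    simp only [hG, if_true, if_false, Bool.false_eq_true]
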